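-- pv_equiv track=rewrite | github.com/TeddiKao/FreeChessWeb | backend/gameplay_api/utils/general.py | get_pawn_attacking_squares
-- ===== SOURCE A (Python) =====
-- import copy
--
-- def get_file(square):
-- 	return int(square) % 8
--
-- def get_pawn_attacking_squares(square, pawn_color):
-- 	attacking_squares = []
--
-- 	if pawn_color == "black":
-- 		attacking_squares += [square - 9, square - 7]
-- 	else:
-- 		attacking_squares += [square + 9, square + 7]
--
-- 	cleaned_attacking_squares = copy.deepcopy(attacking_squares)
-- 	for attacking_square in attacking_squares:
-- 		if abs(get_file(square) - get_file(attacking_square)) > 1: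
-- 			cleaned_attacking_squares.remove(attacking_square)
--
-- 	return cleaned_attacking_squares
-- ===== SOURCE B (Python) =====
-- def get_pawn_attacking_squares(square, pawn_color):
--     f = square % 8
--     result = []
--     if pawn_color == "black":
--         if f != 0:
--             result.append(square - 9)
--         if f != 7:
--             result.append(square - 7)
--     else:
--         if f != 7:
--             result.append(square + 9)
--         if f != 0:
--             result.append(square + 7)
--     return result
-- ===== Notes on version B (the rewrite author's own statement) =====
-- stated objective: simpler
-- what changed: B computes the file once and appends each diagonal square under its edge-file guard (generate-guarded, single pass), instead of A's generate-then-filter with copy.deepcopy and list.remove.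
import Mathlib
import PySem

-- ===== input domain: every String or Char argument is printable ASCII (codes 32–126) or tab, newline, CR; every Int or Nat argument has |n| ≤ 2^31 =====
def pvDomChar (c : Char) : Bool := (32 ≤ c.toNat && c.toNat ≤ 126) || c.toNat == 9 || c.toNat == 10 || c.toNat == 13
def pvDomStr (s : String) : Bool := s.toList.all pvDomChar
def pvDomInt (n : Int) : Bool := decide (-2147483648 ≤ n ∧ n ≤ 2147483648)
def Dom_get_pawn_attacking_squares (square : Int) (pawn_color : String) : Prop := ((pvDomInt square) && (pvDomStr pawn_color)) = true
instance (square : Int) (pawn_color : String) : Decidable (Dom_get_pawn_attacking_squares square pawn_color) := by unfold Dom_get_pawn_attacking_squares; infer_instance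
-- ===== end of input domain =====

-- B builds the attack list in one guarded pass (no deepcopy / remove filter); same return value everywhere.
-- ===== PORT A =====
def get_file (square : Int) : Int := PySem.Int.mod square 8

def get_pawn_attacking_squares (square : Int) (pawn_color : String) : List Int :=
  let attacking_squares : List Int :=
    if pawn_color == "black" then [square - 9, square - 7] else [square + 9, square + 7]
  -- cleaned_attacking_squares starts as a copy of attacking_squares; the loop removes over-wrapping squares.
  -- list.remove here always finds its element, so remove?'s none case (Python ValueError) is unreachable.
  attacking_squares.foldl
    (fun cleaned attacking_square =>
      if 1 < (get_file square - get_file attacking_square).natAbs then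
        (PySem.List.remove? cleaned attacking_square).getD cleaned
      else cleaned)
    attacking_squares

-- ===== PORT B =====
def get_pawn_attacking_squares_alt (square : Int) (pawn_color : String) : List Int :=
  let f := PySem.Int.mod square 8
  if pawn_color == "black" then
    (if f ≠ 0 then [square - 9] else []) ++ (if f ≠ 7 then [square - 7] else [])
  else
    (if f ≠ 7 then [square + 9] else []) ++ (if f ≠ 0 then [square + 7] else [])

-- ===== PRECONDITION & SPEC =====
def Spec_get_pawn_attacking_squares (square : Int) (pawn_color : String) (out : List Int) : Prop := out = get_pawn_attacking_squares_alt square pawn_color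
instance (square : Int) (pawn_color : String) (out : List Int) : Decidable (Spec_get_pawn_attacking_squares square pawn_color out) := by unfold Spec_get_pawn_attacking_squares; infer_instance

-- ===== CLAIM (what is proved, stated in full; the proofs are below) =====
def Claim_equal_get_pawn_attacking_squares : Prop := ∀ (square : Int) (pawn_color : String), Dom_get_pawn_attacking_squares square pawn_color → Spec_get_pawn_attacking_squares square pawn_color (get_pawn_attacking_squares square pawn_color)

-- ===== LEMMAS AND PROOFS =====

-- ===== VERDICT (by name: the statement is the Claim_ definition above) =====
theorem get_pawn_attacking_squares_spec : Claim_equal_get_pawn_attacking_squares := by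
  intro square pawn_color _
  unfold Spec_get_pawn_attacking_squares get_pawn_attacking_squares get_pawn_attacking_squares_alt get_file
  simp only [PySem.Int.mod_eq_emod_of_pos (a := square) (by norm_num : (0:Int) < 8),
    PySem.Int.mod_eq_emod_of_pos (by norm_num : (0:Int) < 8)]
  have h1 : (square - 9 : Int) ≠ square - 7 := by omega
  have h2 : (square + 9 : Int) ≠ square + 7 := by omega
  by_cases h : pawn_color == "black" <;>
    simp only [h, if_true, if_false, Bool.false_eq_true, List.foldl] <;>
    split_ifs <;>
    first
      | (exfalso; omega)
      | simp [PySem.List.remove?, List.idxOf?_cons, h1, h2, List.eraseIdx]
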